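-- pv_equiv track=rewrite | github.com/vamsikrishna07/Amazon-OA | findMaximumProducts.py | findMaxProducts1
-- ===== SOURCE A (Python) =====
-- def findMaxProducts1(arr):
--     n = len(arr)
--     dp = [0]*n
--     for i in range(n):
--         dp[i] = arr[i]
--         for j in range(i):
--             dp[i] = max(dp[i], dp[j]+min(arr[i],arr[j]+1))
--     return max(dp)
-- ===== SOURCE B (Python) =====
-- def _first_key_ge(front, a):
--     # front has strictly increasing keys; first index i with front[i][0] >= a
--     lo, hi = 0, len(front)
--     while lo < hi:
--         mid = (lo + hi) // 2
--         if front[mid][0] < a: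
--             lo = mid + 1
--         else:
--             hi = mid
--     return lo
--
--
-- def _push_hi(front, v, d):
--     # front: keys strictly increasing, payloads strictly decreasing.
--     # It answers "max payload among seen pairs with key >= a" at the first key >= a.
--     i = _first_key_ge(front, v)
--     if i < len(front) and front[i][1] >= d:
--         return  # dominated by an entry with key >= v and payload >= d
--     j = i + 1 if i < len(front) and front[i][0] == v else i
--     k = i
--     while k > 0 and front[k - 1][1] <= d:
--         k -= 1
--     front[k:j] = [(v, d)]
--
--
-- def _push_lo(front, v, e):
--     # front: keys strictly increasing, payloads strictly increasing.
--     # It answers "max payload among seen pairs with key < a" at the last key < a.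
--     i = _first_key_ge(front, v)
--     j = i + 1 if i < len(front) and front[i][0] == v else i
--     if j > 0 and front[j - 1][1] >= e:
--         return  # dominated by an entry with key <= v and payload >= e
--     k = i
--     while k < len(front) and front[k][1] <= e:
--         k += 1
--     front[i:k] = [(v, e)]
--
--
-- def findMaxProducts1(arr):
--     # dp chain value: split min(a, v+1) into its two cases and answer each with
--     # a Pareto front queried by binary search instead of rescanning all pairs.
--     hi = []   # (value, dp): max dp over seen pairs with value >= a
--     lo = []   # (value, dp+value+1): max over seen pairs with value < a
--     best = None
--     for a in arr:
--         cand = a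
--         i = _first_key_ge(hi, a)
--         if i < len(hi):
--             cand = max(cand, a + hi[i][1])
--         k = _first_key_ge(lo, a)
--         if k > 0:
--             cand = max(cand, lo[k - 1][1])
--         if best is None or cand > best:
--             best = cand
--         _push_hi(hi, a, cand)
--         _push_lo(lo, a, cand + a + 1)
--     return best
-- ===== Notes on version B (the rewrite author's own statement) =====
-- stated objective: faster
-- what changed: B splits min(arr[i], arr[j]+1) into its two cases and replaces A's quadratic inner rescan by two incrementally-maintained Pareto fronts (value-sorted dominance lists) queried with binary search, giving amortized O(log n) per element instead of O(n).
import Mathlib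
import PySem

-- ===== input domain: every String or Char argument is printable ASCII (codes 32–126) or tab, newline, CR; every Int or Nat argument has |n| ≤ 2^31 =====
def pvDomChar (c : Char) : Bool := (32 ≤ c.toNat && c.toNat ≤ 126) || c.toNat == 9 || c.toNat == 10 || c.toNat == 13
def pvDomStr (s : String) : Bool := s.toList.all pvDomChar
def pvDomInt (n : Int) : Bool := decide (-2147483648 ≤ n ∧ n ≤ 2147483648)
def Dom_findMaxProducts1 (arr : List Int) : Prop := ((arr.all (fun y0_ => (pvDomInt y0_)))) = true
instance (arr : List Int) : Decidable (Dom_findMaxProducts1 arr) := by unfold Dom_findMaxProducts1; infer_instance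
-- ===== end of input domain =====

-- B replaces A's quadratic inner rescan by two incrementally maintained Pareto fronts
-- (value-sorted dominance lists) queried with binary search (objective: faster, measured).

-- ===== PORT A =====
def findMaxProducts1 (arr : List Int) : Int :=
  let n := arr.length
  let dp : List Int := List.replicate n 0
  let dp := (List.range n).foldl (fun dp i =>
    let dp := dp.set i (arr.getD i 0)   -- dp[i] = arr[i]; 0 ≤ i < n so the index is in range
    (List.range i).foldl (fun dp j =>
      dp.set i (max (dp.getD i 0) (dp.getD j 0 + min (arr.getD i 0) (arr.getD j 0 + 1)))) dp) dp
  (dp.max?).getD 0   -- max(dp); on empty arr Python raises ValueError, excluded by Pre_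

-- ===== PORT B =====
-- _first_key_ge's while loop (binary search); lo/hi are the Python locals
def pvBisect (front : List (Int × Int)) (a : Int) (lo hi : Nat) : Nat :=
  if _h : lo < hi then
    let mid := (lo + hi) / 2
    if (front.getD mid (0, 0)).1 < a then pvBisect front a (mid + 1) hi
    else pvBisect front a lo mid
  else lo
termination_by hi - lo
decreasing_by all_goals omega

def pvFirstKeyGe (front : List (Int × Int)) (a : Int) : Nat :=
  pvBisect front a 0 front.length

-- _push_hi's "while k > 0 and front[k-1][1] <= d: k -= 1"
def pvShrinkHi (front : List (Int × Int)) (d : Int) (k : Nat) : Nat :=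
  if _h : 0 < k ∧ (front.getD (k - 1) (0, 0)).2 ≤ d then pvShrinkHi front d (k - 1) else k
termination_by k
decreasing_by omega

-- _push_lo's "while k < len(front) and front[k][1] <= e: k += 1"
def pvGrowLo (front : List (Int × Int)) (e : Int) (k : Nat) : Nat :=
  if _h : k < front.length ∧ (front.getD k (0, 0)).2 ≤ e then pvGrowLo front e (k + 1) else k
termination_by front.length - k
decreasing_by omega

-- _push_hi; the slice assignment front[k:j] = [(v,d)] becomes take/drop
def pvPushHi (front : List (Int × Int)) (v d : Int) : List (Int × Int) :=
  let i := pvFirstKeyGe front v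
  if i < front.length ∧ d ≤ (front.getD i (0, 0)).2 then front
  else
    let j := if i < front.length ∧ (front.getD i (0, 0)).1 = v then i + 1 else i
    let k := pvShrinkHi front d i
    front.take k ++ [(v, d)] ++ front.drop j

-- _push_lo; the slice assignment front[i:k] = [(v,e)] becomes take/drop
def pvPushLo (front : List (Int × Int)) (v e : Int) : List (Int × Int) :=
  let i := pvFirstKeyGe front v
  let j := if i < front.length ∧ (front.getD i (0, 0)).1 = v then i + 1 else i
  if 0 < j ∧ e ≤ (front.getD (j - 1) (0, 0)).2 then front
  else
    let k := pvGrowLo front e i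
    front.take i ++ [(v, e)] ++ front.drop k

-- one iteration of the main for-loop; state = (hi, lo, best)
def pvStepB (st : List (Int × Int) × List (Int × Int) × Option Int) (a : Int) :
    List (Int × Int) × List (Int × Int) × Option Int :=
  let hi := st.1
  let lo := st.2.1
  let best := st.2.2
  let cand := a
  let i := pvFirstKeyGe hi a
  let cand := if i < hi.length then max cand (a + (hi.getD i (0, 0)).2) else cand
  let k := pvFirstKeyGe lo a
  let cand := if 0 < k then max cand (lo.getD (k - 1) (0, 0)).2 else cand
  let best := match best with
    | none => some cand
    | some b => if b < cand then some cand else some b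
  (pvPushHi hi a cand, pvPushLo lo a (cand + a + 1), best)

def findMaxProducts1_alt (arr : List Int) : Int :=
  ((arr.foldl pvStepB ([], [], none)).2.2).getD 0   -- best; None on empty arr, excluded by Pre_

-- ===== PRECONDITION & SPEC =====
-- On the empty list the Python A raises ValueError (max() of an empty sequence); B returns None there.
def Pre_findMaxProducts1 (arr : List Int) : Prop := arr ≠ []
instance (arr : List Int) : Decidable (Pre_findMaxProducts1 arr) := by unfold Pre_findMaxProducts1; infer_instance
def pvWitness_findMaxProducts1 : List Int := [3, 1, 2]
def Spec_findMaxProducts1 (arr : List Int) (out : Int) : Prop := out = findMaxProducts1_alt arr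
instance (arr : List Int) (out : Int) : Decidable (Spec_findMaxProducts1 arr out) := by unfold Spec_findMaxProducts1; infer_instance

-- ===== CLAIM (what is proved, stated in full; the proofs are below) =====
def Claim_equal_findMaxProducts1 : Prop := ∀ (arr : List Int), Dom_findMaxProducts1 arr → Pre_findMaxProducts1 arr → Spec_findMaxProducts1 arr (findMaxProducts1 arr)

-- ===== LEMMAS AND PROOFS =====

-- Common reference: the list of (value, dp-value) pairs the quadratic DP produces.
def pvG (a : Int) (l : List (Int × Int)) : Int :=
  l.foldl (fun m p => max m (p.2 + min a (p.1 + 1))) a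

def pvStep (seen : List (Int × Int)) (a : Int) : List (Int × Int) :=
  seen ++ [(a, pvG a seen)]

def pvRef (xs : List Int) : List (Int × Int) := xs.foldl pvStep []

lemma pvRef_fst_aux (xs : List Int) : ∀ seen : List (Int × Int),
    ((xs.foldl pvStep seen).map Prod.fst) = seen.map Prod.fst ++ xs := by
  induction xs with
  | nil => intro seen; simp
  | cons a xs ih =>
      intro seen
      simp [List.foldl_cons, ih, pvStep]

lemma pvRef_fst (xs : List Int) : (pvRef xs).map Prod.fst = xs := by
  simpa using pvRef_fst_aux xs []

lemma pvRef_length (xs : List Int) : (pvRef xs).length = xs.length := by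
  have := congrArg List.length (pvRef_fst xs)
  simpa using this

lemma pvRef_take_succ (arr : List Int) (k : Nat) (hk : k < arr.length) :
    pvRef (arr.take (k + 1)) = pvStep (pvRef (arr.take k)) (arr.getD k 0) := by
  have h1 : arr.take (k + 1) = arr.take k ++ [arr.getD k 0] := by
    rw [List.take_add_one]
    congr 1
    simp [List.getD, hk]
  rw [h1]
  simp [pvRef, List.foldl_append]

-- positional helpers
lemma pv_set_at_length {α : Type} (l1 : List α) (x y : α) (l2 : List α) :
    (l1 ++ x :: l2).set l1.length y = l1 ++ y :: l2 := by
  induction l1 with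
  | nil => simp
  | cons a l1 ih => simp [ih]

lemma pv_getD_at_length {α : Type} (l1 : List α) (x : α) (l2 : List α) (d : α) :
    (l1 ++ x :: l2).getD l1.length d = x := by
  induction l1 with
  | nil => simp [List.getD]
  | cons a l1 ih => simpa [List.getD] using ih

lemma pv_set_at {α : Type} (l1 : List α) (x y : α) (l2 : List α) (k : Nat) (h : l1.length = k) :
    (l1 ++ x :: l2).set k y = l1 ++ y :: l2 := by
  subst h; exact pv_set_at_length l1 x y l2

lemma pv_getD_at {α : Type} (l1 : List α) (x : α) (l2 : List α) (d : α) (k : Nat) (h : l1.length = k) :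
    (l1 ++ x :: l2).getD k d = x := by
  subst h; exact pv_getD_at_length l1 x l2 d

-- the inner j-loop of A computes pvG over the first m processed pairs
lemma pv_inner (arr : List Int) (k : Nat) (hk : k < arr.length) (suffix : List Int) :
    ∀ m, m ≤ k →
      (List.range m).foldl (fun dp j =>
          dp.set k (max (dp.getD k 0) (dp.getD j 0 + min (arr.getD k 0) (arr.getD j 0 + 1))))
        (((pvRef (arr.take k)).map Prod.snd) ++ arr.getD k 0 :: suffix)
      = ((pvRef (arr.take k)).map Prod.snd) ++
          (pvG (arr.getD k 0) ((pvRef (arr.take k)).take m)) :: suffix := by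
  have hplen : (pvRef (arr.take k)).length = k := by
    rw [pvRef_length, List.length_take]
    omega
  have hpreflen : ((pvRef (arr.take k)).map Prod.snd).length = k := by
    rw [List.length_map]; exact hplen
  intro m
  induction m with
  | zero => intro _; simp [pvG]
  | succ m ih =>
      intro hmk
      have hm : m < k := by omega
      have hmp : m < (pvRef (arr.take k)).length := by omega
      rw [List.range_succ, List.foldl_append, ih (le_of_lt hm)]
      simp only [List.foldl_cons, List.foldl_nil]
      have e1 : (((pvRef (arr.take k)).map Prod.snd) ++
          (pvG (arr.getD k 0) ((pvRef (arr.take k)).take m)) :: suffix).getD k 0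
          = pvG (arr.getD k 0) ((pvRef (arr.take k)).take m) := by
        exact pv_getD_at _ _ _ _ _ hpreflen
      have e2 : (((pvRef (arr.take k)).map Prod.snd) ++
          (pvG (arr.getD k 0) ((pvRef (arr.take k)).take m)) :: suffix).getD m 0
          = ((pvRef (arr.take k)).map Prod.snd).getD m 0 := by
        apply List.getD_append
        omega
      have e3 : ∀ v : Int, (((pvRef (arr.take k)).map Prod.snd) ++
          (pvG (arr.getD k 0) ((pvRef (arr.take k)).take m)) :: suffix).set k v
          = ((pvRef (arr.take k)).map Prod.snd) ++ v :: suffix := by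
        intro v
        exact pv_set_at _ _ _ _ _ hpreflen
      have e4 : ((pvRef (arr.take k)).map Prod.snd).getD m 0 = ((pvRef (arr.take k))[m]).2 := by
        simp [List.getD, List.getElem?_map, List.getElem?_eq_getElem hmp]
      have e5 : arr.getD m 0 = ((pvRef (arr.take k))[m]).1 := by
        have h1 : ((pvRef (arr.take k)).map Prod.fst).getD m 0 = (arr.take k).getD m 0 := by
          rw [pvRef_fst]
        have h2 : ((pvRef (arr.take k)).map Prod.fst).getD m 0 = ((pvRef (arr.take k))[m]).1 := by
          simp [List.getD, List.getElem?_map, List.getElem?_eq_getElem hmp]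
        have h3 : (arr.take k).getD m 0 = arr.getD m 0 := by
          simp [List.getD, hm]
        rw [← h3, ← h1, h2]
      have e6 : pvG (arr.getD k 0) ((pvRef (arr.take k)).take (m + 1))
          = max (pvG (arr.getD k 0) ((pvRef (arr.take k)).take m))
              (((pvRef (arr.take k))[m]).2 + min (arr.getD k 0) (((pvRef (arr.take k))[m]).1 + 1)) := by
        have htake : (pvRef (arr.take k)).take (m + 1)
            = (pvRef (arr.take k)).take m ++ [(pvRef (arr.take k))[m]] := by
          rw [List.take_add_one, List.getElem?_eq_getElem hmp]
          simp
        rw [pvG, pvG, htake]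
        simp only [List.foldl_append, List.foldl_cons, List.foldl_nil]
      rw [e1, e2, e3, e4, e5, e6]

-- the outer i-loop builds exactly the dp values of pvRef
lemma pv_outer (arr : List Int) :
    ∀ k, k ≤ arr.length →
      (List.range k).foldl (fun dp i =>
          (List.range i).foldl (fun dp j =>
              dp.set i (max (dp.getD i 0) (dp.getD j 0 + min (arr.getD i 0) (arr.getD j 0 + 1))))
            (dp.set i (arr.getD i 0)))
        (List.replicate arr.length (0 : Int))
      = ((pvRef (arr.take k)).map Prod.snd) ++ List.replicate (arr.length - k) (0 : Int) := by
  intro k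
  induction k with
  | zero => intro _; simp [pvRef]
  | succ k ih =>
      intro hk1
      have hk : k < arr.length := by omega
      have hplen : (pvRef (arr.take k)).length = k := by
        rw [pvRef_length, List.length_take]; omega
      have hpreflen : ((pvRef (arr.take k)).map Prod.snd).length = k := by
        rw [List.length_map]; exact hplen
      rw [List.range_succ, List.foldl_append, ih (by omega)]
      simp only [List.foldl_cons, List.foldl_nil]
      have hrep : List.replicate (arr.length - k) (0 : Int)
          = (0 : Int) :: List.replicate (arr.length - (k + 1)) 0 := by
        rw [show arr.length - k = (arr.length - (k + 1)) + 1 by omega]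
        rfl
      rw [hrep, pv_set_at _ _ _ _ _ hpreflen, pv_inner arr k hk _ k le_rfl]
      have htk : (pvRef (arr.take k)).take k = pvRef (arr.take k) := by
        have h0 : (pvRef (arr.take k)).take ((pvRef (arr.take k)).length) = pvRef (arr.take k) :=
          List.take_length
        rwa [hplen] at h0
      rw [htk, pvRef_take_succ arr k hk]
      simp [pvStep]

lemma pv_A_eq (arr : List Int) :
    findMaxProducts1 arr = (((pvRef arr).map Prod.snd).max?).getD 0 := by
  have h := pv_outer arr arr.length le_rfl
  rw [List.take_length] at h
  simp only [Nat.sub_self, List.replicate_zero, List.append_nil] at h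
  simp only [findMaxProducts1]
  rw [h]

-- ===== B-side: front invariants =====

-- hi front: keys strictly increasing, payloads strictly decreasing; covers "max dp with key ≥ a"
def pvHiFront (front seen : List (Int × Int)) : Prop :=
  front.Pairwise (fun p q => p.1 < q.1 ∧ q.2 < p.2) ∧
  (∀ p ∈ front, p ∈ seen) ∧
  (∀ p ∈ seen, ∃ q ∈ front, p.1 ≤ q.1 ∧ p.2 ≤ q.2)

-- lo front: keys strictly increasing, payloads strictly increasing; covers "max payload with key < a"
def pvLoFront (front seen : List (Int × Int)) : Prop :=
  front.Pairwise (fun p q => p.1 < q.1 ∧ p.2 < q.2) ∧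
  (∀ p ∈ front, p ∈ seen) ∧
  (∀ p ∈ seen, ∃ q ∈ front, q.1 ≤ p.1 ∧ p.2 ≤ q.2)

def pvSeenE (seen : List (Int × Int)) : List (Int × Int) :=
  seen.map (fun p => (p.1, p.2 + p.1 + 1))

lemma pv_keys_mono (front : List (Int × Int))
    (hs : front.Pairwise (fun p q : Int × Int => p.1 < q.1)) :
    ∀ s t (hts : s ≤ t) (ht : t < front.length), (front[s]'(by omega)).1 ≤ (front[t]).1 := by
  intro s t hts ht
  rcases Nat.lt_or_eq_of_le hts with h | h
  · exact le_of_lt ((List.pairwise_iff_getElem.mp hs) s t (by omega) ht h)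
  · subst h; rfl

lemma pvBisect_spec (front : List (Int × Int)) (a : Int)
    (hs : front.Pairwise (fun p q : Int × Int => p.1 < q.1)) :
    ∀ (lo hi : Nat), lo ≤ hi → hi ≤ front.length →
      (∀ t (ht : t < front.length), t < lo → (front[t]).1 < a) →
      (∀ t (ht : t < front.length), hi ≤ t → a ≤ (front[t]).1) →
      pvBisect front a lo hi ≤ front.length ∧
      (∀ t (ht : t < front.length), t < pvBisect front a lo hi → (front[t]).1 < a) ∧
      (∀ t (ht : t < front.length), pvBisect front a lo hi ≤ t → a ≤ (front[t]).1) := by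
  intro lo hi
  induction lo, hi using pvBisect.induct front a with
  | case1 lo hi hlt mid hkey ih =>
      intro hlohi hhil Hlo Hhi
      have hkey' : (front.getD ((lo + hi) / 2) (0, 0)).1 < a := hkey
      have heq : pvBisect front a lo hi = pvBisect front a ((lo + hi) / 2 + 1) hi := by
        rw [pvBisect]
        simp only [dif_pos hlt, if_pos hkey']
      have hmlen : (lo + hi) / 2 < front.length := by omega
      have hkg : (front[(lo + hi) / 2]'hmlen).1 < a := by
        rw [← List.getD_eq_getElem front (0, 0) hmlen]; exact hkey'
      rw [heq]
      refine ih (by omega) hhil ?_ Hhi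
      intro t ht h
      have hm := pv_keys_mono front hs t ((lo + hi) / 2) (by omega) hmlen
      omega
  | case2 lo hi hlt mid hkey ih =>
      intro hlohi hhil Hlo Hhi
      have hkey' : ¬ (front.getD ((lo + hi) / 2) (0, 0)).1 < a := hkey
      have heq : pvBisect front a lo hi = pvBisect front a lo ((lo + hi) / 2) := by
        rw [pvBisect]
        simp only [dif_pos hlt, if_neg hkey']
      have hmlen : (lo + hi) / 2 < front.length := by omega
      have hkg : a ≤ (front[(lo + hi) / 2]'hmlen).1 := by
        rw [← List.getD_eq_getElem front (0, 0) hmlen]; omega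
      rw [heq]
      refine ih (by omega) (by omega) Hlo ?_
      intro t ht h
      have hm := pv_keys_mono front hs ((lo + hi) / 2) t h ht
      omega
  | case3 lo hi hge =>
      intro hlohi hhil Hlo Hhi
      rw [pvBisect, dif_neg hge]
      exact ⟨by omega, fun t ht h => Hlo t ht h, fun t ht h => Hhi t ht (by omega)⟩

lemma pvFirstKeyGe_spec (front : List (Int × Int)) (a : Int)
    (hs : front.Pairwise (fun p q : Int × Int => p.1 < q.1)) :
    pvFirstKeyGe front a ≤ front.length ∧
    (∀ t (ht : t < front.length), t < pvFirstKeyGe front a → (front[t]).1 < a) ∧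
    (∀ t (ht : t < front.length), pvFirstKeyGe front a ≤ t → a ≤ (front[t]).1) := by
  unfold pvFirstKeyGe
  exact pvBisect_spec front a hs 0 front.length (Nat.zero_le _) le_rfl
    (by omega) (by intro t ht h; omega)

lemma pvShrinkHi_spec (front : List (Int × Int)) (d : Int) :
    ∀ k, k ≤ front.length →
      pvShrinkHi front d k ≤ k ∧
      (∀ t (ht : t < front.length), pvShrinkHi front d k ≤ t → t < k → (front[t]).2 ≤ d) ∧
      (∀ (h0 : pvShrinkHi front d k ≠ 0) (h1 : pvShrinkHi front d k - 1 < front.length),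
        d < (front[pvShrinkHi front d k - 1]).2) := by
  intro k
  induction k using pvShrinkHi.induct front d with
  | case1 k h ih =>
      intro hk
      have heq : pvShrinkHi front d k = pvShrinkHi front d (k - 1) := by
        rw [pvShrinkHi, dif_pos h]
      obtain ⟨ih1, ih2, ih3⟩ := ih (by omega)
      rw [heq]
      refine ⟨by omega, ?_, ih3⟩
      intro t ht h1 h2
      by_cases ht2 : t < k - 1
      · exact ih2 t ht h1 ht2
      · have hte : t = k - 1 := by omega
        subst hte
        have h3 := h.2
        rwa [List.getD_eq_getElem front (0, 0) ht] at h3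
  | case2 k h =>
      intro hk
      have heq : pvShrinkHi front d k = k := by
        rw [pvShrinkHi, dif_neg h]
      rw [heq]
      refine ⟨le_refl k, by omega, ?_⟩
      intro _h0 h1
      have h2 : ¬ (front.getD (k - 1) (0, 0)).2 ≤ d := by
        intro hc; exact h ⟨by omega, hc⟩
      rwa [List.getD_eq_getElem front (0, 0) h1, not_le] at h2

lemma pvGrowLo_spec (front : List (Int × Int)) (e : Int) :
    ∀ k, k ≤ front.length →
      k ≤ pvGrowLo front e k ∧ pvGrowLo front e k ≤ front.length ∧
      (∀ t (ht : t < front.length), k ≤ t → t < pvGrowLo front e k → (front[t]).2 ≤ e) ∧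
      (∀ (h1 : pvGrowLo front e k < front.length), e < (front[pvGrowLo front e k]).2) := by
  intro k
  induction k using pvGrowLo.induct front e with
  | case1 k h ih =>
      intro hk
      have heq : pvGrowLo front e k = pvGrowLo front e (k + 1) := by
        rw [pvGrowLo, dif_pos h]
      obtain ⟨ih1, ih2, ih3, ih4⟩ := ih (by omega)
      rw [heq]
      refine ⟨by omega, ih2, ?_, ih4⟩
      intro t ht h1 h2
      by_cases ht2 : k + 1 ≤ t
      · exact ih3 t ht ht2 h2
      · have hte : t = k := by omega
        subst hte
        have h3 := h.2
        rwa [List.getD_eq_getElem front (0, 0) ht] at h3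
  | case2 k h =>
      intro hk
      have heq : pvGrowLo front e k = k := by
        rw [pvGrowLo, dif_neg h]
      rw [heq]
      refine ⟨le_refl k, hk, by omega, ?_⟩
      intro h1
      have h2 : ¬ (front.getD k (0, 0)).2 ≤ e := by
        intro hc; exact h ⟨h1, hc⟩
      rwa [List.getD_eq_getElem front (0, 0) h1, not_le] at h2

lemma pv_mem_take {α : Type} (l : List α) (k : Nat) (p : α) :
    p ∈ l.take k ↔ ∃ t, ∃ ht : t < l.length, t < k ∧ l[t] = p := by
  constructor
  · intro hp
    obtain ⟨t, ht, he⟩ := List.mem_iff_getElem.mp hp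
    have htl : t < l.length := by
      have := ht; simp [List.length_take] at this; omega
    refine ⟨t, htl, ?_, ?_⟩
    · have := ht; simp [List.length_take] at this; omega
    · rw [← he, List.getElem_take]
  · rintro ⟨t, ht, htk, he⟩
    apply List.mem_iff_getElem.mpr
    refine ⟨t, by simp [List.length_take]; omega, ?_⟩
    rw [List.getElem_take]; exact he

lemma pv_mem_drop {α : Type} (l : List α) (j : Nat) (p : α) :
    p ∈ l.drop j ↔ ∃ t, ∃ ht : t < l.length, j ≤ t ∧ l[t] = p := by
  constructor
  · intro hp
    obtain ⟨t, ht, he⟩ := List.mem_iff_getElem.mp hp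
    have htl : j + t < l.length := by
      have := ht; simp [List.length_drop] at this; omega
    refine ⟨j + t, htl, by omega, ?_⟩
    rw [← he, List.getElem_drop]
  · rintro ⟨t, ht, htj, he⟩
    apply List.mem_iff_getElem.mpr
    refine ⟨t - j, by simp [List.length_drop]; omega, ?_⟩
    rw [List.getElem_drop, ← he]
    congr 1
    omega

lemma pv_hi_rebuild (front seen : List (Int × Int)) (v d : Int) (k j : Nat)
    (hch : front.Pairwise (fun p q => p.1 < q.1 ∧ q.2 < p.2))
    (hmem : ∀ p ∈ front, p ∈ seen)
    (hdom : ∀ p ∈ seen, ∃ q ∈ front, p.1 ≤ q.1 ∧ p.2 ≤ q.2)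
    (hkey_lt : ∀ t (ht : t < front.length), t < k → (front[t]).1 < v)
    (hpay_gt : ∀ t (ht : t < front.length), t < k → d < (front[t]).2)
    (hkey_gt : ∀ t (ht : t < front.length), j ≤ t → v < (front[t]).1)
    (hpay_lt : ∀ t (ht : t < front.length), j ≤ t → (front[t]).2 < d)
    (hmid : ∀ t (ht : t < front.length), k ≤ t → t < j → (front[t]).1 ≤ v ∧ (front[t]).2 ≤ d) :
    pvHiFront (front.take k ++ [(v, d)] ++ front.drop j) (seen ++ [(v, d)]) := by
  refine ⟨?_, ?_, ?_⟩
  · -- chain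
    rw [List.append_assoc, List.pairwise_append]
    refine ⟨hch.take, ?_, ?_⟩
    · rw [show ([(v, d)] ++ front.drop j) = (v, d) :: front.drop j from rfl, List.pairwise_cons]
      refine ⟨?_, hch.drop⟩
      intro q hq
      obtain ⟨t, ht, htj, he⟩ := (pv_mem_drop front j q).mp hq
      subst he
      exact ⟨hkey_gt t ht htj, hpay_lt t ht htj⟩
    · intro p hp q hq
      obtain ⟨s, hs, hsk, he⟩ := (pv_mem_take front k p).mp hp
      subst he
      rcases List.mem_cons.mp hq with rfl | hq2
      · exact ⟨hkey_lt s hs hsk, hpay_gt s hs hsk⟩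
      · obtain ⟨t, ht, htj, he⟩ := (pv_mem_drop front j q).mp hq2
        subst he
        refine ⟨lt_trans (hkey_lt s hs hsk) (hkey_gt t ht htj), ?_⟩
        exact lt_trans (hpay_lt t ht htj) (hpay_gt s hs hsk)
  · -- membership
    intro p hp
    rcases List.mem_append.mp hp with hp1 | hp2
    · rcases List.mem_append.mp hp1 with hp3 | hp4
      · exact List.mem_append_left _ (hmem p (List.mem_of_mem_take hp3))
      · simp at hp4; subst hp4; simp
    · exact List.mem_append_left _ (hmem p (List.mem_of_mem_drop hp2))
  · -- domination
    intro p hp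
    rcases List.mem_append.mp hp with hp1 | hp2
    · obtain ⟨q, hq, hq1, hq2⟩ := hdom p hp1
      obtain ⟨t, ht, he⟩ := List.mem_iff_getElem.mp hq
      subst he
      by_cases htk : t < k
      · exact ⟨front[t], by
          apply List.mem_append_left
          apply List.mem_append_left
          exact (pv_mem_take front k front[t]).mpr ⟨t, ht, htk, rfl⟩, hq1, hq2⟩
      · by_cases htj : j ≤ t
        · exact ⟨front[t], by
            apply List.mem_append_right
            exact (pv_mem_drop front j front[t]).mpr ⟨t, ht, htj, rfl⟩, hq1, hq2⟩
        · obtain ⟨hm1, hm2⟩ := hmid t ht (by omega) (by omega)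
          exact ⟨(v, d), by simp, le_trans hq1 hm1, le_trans hq2 hm2⟩
    · simp at hp2
      subst hp2
      exact ⟨(v, d), by simp, le_refl _, le_refl _⟩

lemma pvPushHi_inv (front seen : List (Int × Int)) (v d : Int)
    (h : pvHiFront front seen) : pvHiFront (pvPushHi front v d) (seen ++ [(v, d)]) := by
  obtain ⟨hch, hmem, hdom⟩ := h
  have hkeys : front.Pairwise (fun p q : Int × Int => p.1 < q.1) := hch.imp (fun h => h.1)
  obtain ⟨hile, hilt, hige⟩ := pvFirstKeyGe_spec front v hkeys
  obtain ⟨hsle, hsreg, hsstop⟩ := pvShrinkHi_spec front d (pvFirstKeyGe front v) hile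
  have hmono := List.pairwise_iff_getElem.mp hch
  simp only [pvPushHi]
  split_ifs with hc hj
  · -- dominated: front unchanged
    obtain ⟨hilen, hd⟩ := hc
    rw [List.getD_eq_getElem front (0, 0) hilen] at hd
    refine ⟨hch, fun p hp => List.mem_append_left _ (hmem p hp), ?_⟩
    intro p hp
    rcases List.mem_append.mp hp with hp1 | hp2
    · exact hdom p hp1
    · simp at hp2; subst hp2
      exact ⟨front[pvFirstKeyGe front v], List.getElem_mem _, hige _ hilen le_rfl, hd⟩
  · -- key v present at index i; replace front[k:i+1]
    push_neg at hc
    obtain ⟨hilen, hkv⟩ := hj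
    rw [List.getD_eq_getElem front (0, 0) hilen] at hkv
    have hnd : (front[pvFirstKeyGe front v]'hilen).2 < d := by
      have := hc hilen
      rwa [List.getD_eq_getElem front (0, 0) hilen] at this
    apply pv_hi_rebuild front seen v d _ _ hch hmem hdom
    · intro t ht htk
      exact hilt t ht (by omega)
    · intro t ht htk
      have hk0 : pvShrinkHi front d (pvFirstKeyGe front v) ≠ 0 := by omega
      have hk1 : pvShrinkHi front d (pvFirstKeyGe front v) - 1 < front.length := by omega
      have hstop := hsstop hk0 hk1
      rcases Nat.lt_or_ge t (pvShrinkHi front d (pvFirstKeyGe front v) - 1) with h1 | h1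
      · exact lt_trans hstop (hmono t _ ht hk1 h1).2
      · have : t = pvShrinkHi front d (pvFirstKeyGe front v) - 1 := by omega
        subst this; exact hstop
    · intro t ht htj
      have := (hmono (pvFirstKeyGe front v) t (by omega) ht (by omega)).1
      omega
    · intro t ht htj
      have := (hmono (pvFirstKeyGe front v) t (by omega) ht (by omega)).2
      omega
    · intro t ht h1 h2
      rcases Nat.lt_or_ge t (pvFirstKeyGe front v) with h3 | h3
      · exact ⟨le_of_lt (hilt t ht h3), hsreg t ht h1 h3⟩
      · have : t = pvFirstKeyGe front v := by omega
        subst this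
        exact ⟨le_of_eq hkv, le_of_lt hnd⟩
  · -- key v absent; replace front[k:i]
    push_neg at hc
    apply pv_hi_rebuild front seen v d _ _ hch hmem hdom
    · intro t ht htk
      exact hilt t ht (by omega)
    · intro t ht htk
      have hk0 : pvShrinkHi front d (pvFirstKeyGe front v) ≠ 0 := by omega
      have hk1 : pvShrinkHi front d (pvFirstKeyGe front v) - 1 < front.length := by omega
      have hstop := hsstop hk0 hk1
      rcases Nat.lt_or_ge t (pvShrinkHi front d (pvFirstKeyGe front v) - 1) with h1 | h1
      · exact lt_trans hstop (hmono t _ ht hk1 h1).2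
      · have : t = pvShrinkHi front d (pvFirstKeyGe front v) - 1 := by omega
        subst this; exact hstop
    · intro t ht htj
      have hilen : pvFirstKeyGe front v < front.length := by omega
      have hge := hige t ht htj
      rcases Nat.lt_or_ge (pvFirstKeyGe front v) t with h1 | h1
      · have := (hmono (pvFirstKeyGe front v) t (by omega) ht h1).1
        have := hige (pvFirstKeyGe front v) hilen le_rfl
        omega
      · have hti : t = pvFirstKeyGe front v := by omega
        have hne : (front[t]).1 ≠ v := by
          intro hcon
          apply hj
          subst hti
          exact ⟨hilen, by rw [List.getD_eq_getElem front (0, 0) hilen]; exact hcon⟩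
        omega
    · intro t ht htj
      have hilen : pvFirstKeyGe front v < front.length := by omega
      have hnd : (front[pvFirstKeyGe front v]'hilen).2 < d := by
        have := hc hilen
        rwa [List.getD_eq_getElem front (0, 0) hilen] at this
      rcases Nat.lt_or_ge (pvFirstKeyGe front v) t with h1 | h1
      · have := (hmono (pvFirstKeyGe front v) t (by omega) ht h1).2
        omega
      · have : t = pvFirstKeyGe front v := by omega
        subst this; exact hnd
    · intro t ht h1 h2
      exact ⟨le_of_lt (hilt t ht h2), hsreg t ht h1 h2⟩

lemma pv_lo_rebuild (front seen : List (Int × Int)) (v e : Int) (i k : Nat)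
    (hch : front.Pairwise (fun p q => p.1 < q.1 ∧ p.2 < q.2))
    (hmem : ∀ p ∈ front, p ∈ seen)
    (hdom : ∀ p ∈ seen, ∃ q ∈ front, q.1 ≤ p.1 ∧ p.2 ≤ q.2)
    (hkey_lt : ∀ t (ht : t < front.length), t < i → (front[t]).1 < v)
    (hpay_lt : ∀ t (ht : t < front.length), t < i → (front[t]).2 < e)
    (hkey_gt : ∀ t (ht : t < front.length), k ≤ t → v < (front[t]).1)
    (hpay_gt : ∀ t (ht : t < front.length), k ≤ t → e < (front[t]).2)
    (hmid : ∀ t (ht : t < front.length), i ≤ t → t < k → v ≤ (front[t]).1 ∧ (front[t]).2 ≤ e) :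
    pvLoFront (front.take i ++ [(v, e)] ++ front.drop k) (seen ++ [(v, e)]) := by
  refine ⟨?_, ?_, ?_⟩
  · rw [List.append_assoc, List.pairwise_append]
    refine ⟨hch.take, ?_, ?_⟩
    · rw [show ([(v, e)] ++ front.drop k) = (v, e) :: front.drop k from rfl, List.pairwise_cons]
      refine ⟨?_, hch.drop⟩
      intro q hq
      obtain ⟨t, ht, htk, he⟩ := (pv_mem_drop front k q).mp hq
      subst he
      exact ⟨hkey_gt t ht htk, hpay_gt t ht htk⟩
    · intro p hp q hq
      obtain ⟨s, hs, hsi, he⟩ := (pv_mem_take front i p).mp hp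
      subst he
      rcases List.mem_cons.mp hq with rfl | hq2
      · exact ⟨hkey_lt s hs hsi, hpay_lt s hs hsi⟩
      · obtain ⟨t, ht, htk, he⟩ := (pv_mem_drop front k q).mp hq2
        subst he
        exact ⟨lt_trans (hkey_lt s hs hsi) (hkey_gt t ht htk),
          lt_trans (hpay_lt s hs hsi) (hpay_gt t ht htk)⟩
  · intro p hp
    rcases List.mem_append.mp hp with hp1 | hp2
    · rcases List.mem_append.mp hp1 with hp3 | hp4
      · exact List.mem_append_left _ (hmem p (List.mem_of_mem_take hp3))
      · simp at hp4; subst hp4; simp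
    · exact List.mem_append_left _ (hmem p (List.mem_of_mem_drop hp2))
  · intro p hp
    rcases List.mem_append.mp hp with hp1 | hp2
    · obtain ⟨q, hq, hq1, hq2⟩ := hdom p hp1
      obtain ⟨t, ht, he⟩ := List.mem_iff_getElem.mp hq
      subst he
      by_cases hti : t < i
      · exact ⟨front[t], by
          apply List.mem_append_left
          apply List.mem_append_left
          exact (pv_mem_take front i front[t]).mpr ⟨t, ht, hti, rfl⟩, hq1, hq2⟩
      · by_cases htk : k ≤ t
        · exact ⟨front[t], by
            apply List.mem_append_right
            exact (pv_mem_drop front k front[t]).mpr ⟨t, ht, htk, rfl⟩, hq1, hq2⟩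
        · obtain ⟨hm1, hm2⟩ := hmid t ht (by omega) (by omega)
          exact ⟨(v, e), by simp, le_trans hm1 hq1, le_trans hq2 hm2⟩
    · simp at hp2
      subst hp2
      exact ⟨(v, e), by simp, le_refl _, le_refl _⟩

lemma pvPushLo_inv (front seen : List (Int × Int)) (v e : Int)
    (h : pvLoFront front seen) : pvLoFront (pvPushLo front v e) (seen ++ [(v, e)]) := by
  obtain ⟨hch, hmem, hdom⟩ := h
  have hkeys : front.Pairwise (fun p q : Int × Int => p.1 < q.1) := hch.imp (fun h => h.1)
  obtain ⟨hile, hilt, hige⟩ := pvFirstKeyGe_spec front v hkeys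
  obtain ⟨hgge, hgle, hgreg, hgstop⟩ := pvGrowLo_spec front e (pvFirstKeyGe front v) hile
  have hmono := List.pairwise_iff_getElem.mp hch
  simp only [pvPushLo]
  split_ifs with hj hd hd
  · -- key v present at i; dominated by front[i]
    obtain ⟨hilen, hkv⟩ := hj
    rw [List.getD_eq_getElem front (0, 0) hilen] at hkv
    rw [List.getD_eq_getElem front (0, 0) (by omega : pvFirstKeyGe front v + 1 - 1 < front.length)] at hd
    refine ⟨hch, fun p hp => List.mem_append_left _ (hmem p hp), ?_⟩
    intro p hp
    rcases List.mem_append.mp hp with hp1 | hp2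
    · exact hdom p hp1
    · simp at hp2; subst hp2
      refine ⟨front[pvFirstKeyGe front v + 1 - 1]'(by omega), List.getElem_mem _, ?_, hd.2⟩
      simp only [Nat.add_sub_cancel]
      exact le_of_eq hkv
  · -- key v present at i, not dominated; replace front[i:k]
    obtain ⟨hilen, hkv⟩ := hj
    rw [List.getD_eq_getElem front (0, 0) hilen] at hkv
    push_neg at hd
    have hnd : (front[pvFirstKeyGe front v]'hilen).2 < e := by
      have := hd (by omega)
      rw [List.getD_eq_getElem front (0, 0)
        (by omega : pvFirstKeyGe front v + 1 - 1 < front.length)] at this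
      simpa using this
    have hki : pvFirstKeyGe front v < pvGrowLo front e (pvFirstKeyGe front v) := by
      rcases Nat.lt_or_ge (pvFirstKeyGe front v) (pvGrowLo front e (pvFirstKeyGe front v)) with h1 | h1
      · exact h1
      · exfalso
        have hke : pvGrowLo front e (pvFirstKeyGe front v) = pvFirstKeyGe front v := by omega
        have := hgstop (by omega)
        simp only [hke] at this
        omega
    apply pv_lo_rebuild front seen v e _ _ hch hmem hdom
    · exact hilt
    · intro t ht hti
      have := (hmono t (pvFirstKeyGe front v) ht hilen hti).2
      omega
    · intro t ht htk
      have := (hmono (pvFirstKeyGe front v) t hilen ht (by omega)).1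
      omega
    · intro t ht htk
      have hklen : pvGrowLo front e (pvFirstKeyGe front v) < front.length := by omega
      have hstop := hgstop hklen
      rcases Nat.lt_or_ge (pvGrowLo front e (pvFirstKeyGe front v)) t with h1 | h1
      · exact lt_trans hstop (hmono _ t hklen ht h1).2
      · have : t = pvGrowLo front e (pvFirstKeyGe front v) := by omega
        subst this; exact hstop
    · intro t ht h1 h2
      exact ⟨hige t ht h1, hgreg t ht h1 h2⟩
  · -- key v absent; dominated by front[i-1]
    push_neg at hj
    obtain ⟨hi0, hde⟩ := hd
    have hi1len : pvFirstKeyGe front v - 1 < front.length := by omega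
    rw [List.getD_eq_getElem front (0, 0) hi1len] at hde
    refine ⟨hch, fun p hp => List.mem_append_left _ (hmem p hp), ?_⟩
    intro p hp
    rcases List.mem_append.mp hp with hp1 | hp2
    · exact hdom p hp1
    · simp at hp2; subst hp2
      exact ⟨front[pvFirstKeyGe front v - 1], List.getElem_mem _,
        le_of_lt (hilt _ hi1len (by omega)), hde⟩
  · -- key v absent, not dominated; replace front[i:k]
    push_neg at hj
    push_neg at hd
    apply pv_lo_rebuild front seen v e _ _ hch hmem hdom
    · exact hilt
    · intro t ht hti
      have hi1len : pvFirstKeyGe front v - 1 < front.length := by omega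
      have hnd : (front[pvFirstKeyGe front v - 1]'hi1len).2 < e := by
        have := hd (by omega)
        rwa [List.getD_eq_getElem front (0, 0) hi1len] at this
      rcases Nat.lt_or_ge t (pvFirstKeyGe front v - 1) with h1 | h1
      · exact lt_trans (hmono t _ ht hi1len h1).2 hnd
      · have : t = pvFirstKeyGe front v - 1 := by omega
        subst this; exact hnd
    · intro t ht htk
      have hti : pvFirstKeyGe front v ≤ t := by omega
      have hge := hige t ht hti
      rcases Nat.lt_or_ge (pvFirstKeyGe front v) t with h1 | h1
      · have := (hmono (pvFirstKeyGe front v) t (by omega) ht h1).1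
        have := hige (pvFirstKeyGe front v) (by omega) le_rfl
        omega
      · have hti2 : t = pvFirstKeyGe front v := by omega
        have hne : (front[t]).1 ≠ v := by
          intro hcon
          have hj2 := hj (by omega)
          rw [List.getD_eq_getElem front (0, 0) (by omega)] at hj2
          simp only [hti2] at hcon
          exact hj2 hcon
        omega
    · intro t ht htk
      have hklen : pvGrowLo front e (pvFirstKeyGe front v) < front.length := by omega
      have hstop := hgstop hklen
      rcases Nat.lt_or_ge (pvGrowLo front e (pvFirstKeyGe front v)) t with h1 | h1
      · exact lt_trans hstop (hmono _ t hklen ht h1).2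
      · have : t = pvGrowLo front e (pvFirstKeyGe front v) := by omega
        subst this; exact hstop
    · intro t ht h1 h2
      exact ⟨hige t ht h1, hgreg t ht h1 h2⟩

-- foldl-max characterization
lemma pv_foldl_max_le (f : Int × Int → Int) (l : List (Int × Int)) (c : Int)
    (hl : ∀ p ∈ l, f p ≤ c) : ∀ b : Int, b ≤ c → l.foldl (fun m p => max m (f p)) b ≤ c := by
  induction l with
  | nil => intro b hb; exact hb
  | cons x xs ih =>
      intro b hb
      exact ih (fun p hp => hl p (by simp [hp])) _ (max_le hb (hl x (by simp)))

lemma pv_le_foldl_max (f : Int × Int → Int) (l : List (Int × Int)) :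
    ∀ b : Int, b ≤ l.foldl (fun m p => max m (f p)) b := by
  induction l with
  | nil => intro b; exact le_refl b
  | cons x xs ih =>
      intro b
      exact le_trans (le_max_left b (f x)) (ih (max b (f x)))

lemma pv_mem_le_foldl_max (f : Int × Int → Int) (l : List (Int × Int))
    (p : Int × Int) (hp : p ∈ l) : ∀ b : Int, f p ≤ l.foldl (fun m p => max m (f p)) b := by
  induction l with
  | nil => cases hp
  | cons x xs ih =>
      intro b
      rcases List.mem_cons.mp hp with h | h
      · subst h
        exact le_trans (le_max_right b (f p)) (pv_le_foldl_max f xs (max b (f p)))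
      · exact ih h _

lemma pv_foldl_max_eq (f : Int × Int → Int) (l : List (Int × Int)) (b c : Int)
    (hb : b ≤ c) (hl : ∀ p ∈ l, f p ≤ c) (hc : c = b ∨ ∃ p ∈ l, c = f p) :
    l.foldl (fun m p => max m (f p)) b = c := by
  apply le_antisymm (pv_foldl_max_le f l c hl b hb)
  rcases hc with h | ⟨p, hp, h⟩
  · rw [h]; exact pv_le_foldl_max f l b
  · rw [h]; exact pv_mem_le_foldl_max f l p hp b

-- the cand computed by pvStepB equals pvG a seen
lemma pv_cand_eq (hi lo seen : List (Int × Int)) (a : Int)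
    (hhi : pvHiFront hi seen) (hlo : pvLoFront lo (pvSeenE seen)) :
    (if 0 < pvFirstKeyGe lo a
      then max (if pvFirstKeyGe hi a < hi.length
          then max a (a + (hi.getD (pvFirstKeyGe hi a) (0, 0)).2) else a)
        ((lo.getD (pvFirstKeyGe lo a - 1) (0, 0)).2)
      else (if pvFirstKeyGe hi a < hi.length
          then max a (a + (hi.getD (pvFirstKeyGe hi a) (0, 0)).2) else a)) = pvG a seen := by
  obtain ⟨hch, hmem, hdom⟩ := hhi
  obtain ⟨lch, lmem, ldom⟩ := hlo
  obtain ⟨hile, hilt, hige⟩ := pvFirstKeyGe_spec hi a (hch.imp (fun h => h.1))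
  obtain ⟨lile, lilt, lige⟩ := pvFirstKeyGe_spec lo a (lch.imp (fun h => h.1))
  have hmono := List.pairwise_iff_getElem.mp hch
  have lmono := List.pairwise_iff_getElem.mp lch
  have hiB : ∀ (h1 : pvFirstKeyGe hi a < hi.length), ∀ p ∈ seen, a ≤ p.1 →
      p.2 ≤ (hi[pvFirstKeyGe hi a]).2 := by
    intro h1 p hp hpa
    obtain ⟨q, hq, hq1, hq2⟩ := hdom p hp
    obtain ⟨t, ht, rfl⟩ := List.mem_iff_getElem.mp hq
    have hti : pvFirstKeyGe hi a ≤ t := by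
      by_contra hcon
      have := hilt t ht (by omega)
      omega
    rcases Nat.lt_or_ge (pvFirstKeyGe hi a) t with h2 | h2
    · have := (hmono _ t h1 ht h2).2
      omega
    · have heq : t = pvFirstKeyGe hi a := by omega
      subst heq
      omega
  have hiN : ¬ (pvFirstKeyGe hi a < hi.length) → ∀ p ∈ seen, p.1 < a := by
    intro h1 p hp
    obtain ⟨q, hq, hq1, hq2⟩ := hdom p hp
    obtain ⟨t, ht, rfl⟩ := List.mem_iff_getElem.mp hq
    have := hilt t ht (by omega)
    omega
  have loB : ∀ (h2 : 0 < pvFirstKeyGe lo a) (hl : pvFirstKeyGe lo a - 1 < lo.length),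
      ∀ p ∈ pvSeenE seen, p.1 < a → p.2 ≤ (lo[pvFirstKeyGe lo a - 1]).2 := by
    intro h2 hl p hp hpa
    obtain ⟨q, hq, hq1, hq2⟩ := ldom p hp
    obtain ⟨t, ht, rfl⟩ := List.mem_iff_getElem.mp hq
    have htk : t < pvFirstKeyGe lo a := by
      by_contra hcon
      have := lige t ht (by omega)
      omega
    rcases Nat.lt_or_ge t (pvFirstKeyGe lo a - 1) with h3 | h3
    · have := (lmono t _ ht hl h3).2
      omega
    · have heq : t = pvFirstKeyGe lo a - 1 := by omega
      subst heq
      omega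
  have loN : pvFirstKeyGe lo a = 0 → ∀ p ∈ pvSeenE seen, a ≤ p.1 := by
    intro h2 p hp
    obtain ⟨q, hq, hq1, hq2⟩ := ldom p hp
    obtain ⟨t, ht, rfl⟩ := List.mem_iff_getElem.mp hq
    have := lige t ht (by omega)
    omega
  rw [pvG]
  by_cases h1 : pvFirstKeyGe hi a < hi.length <;> by_cases h2 : 0 < pvFirstKeyGe lo a
  · have hl2 : pvFirstKeyGe lo a - 1 < lo.length := by omega
    rw [if_pos h2, if_pos h1, List.getD_eq_getElem hi (0, 0) h1,
      List.getD_eq_getElem lo (0, 0) hl2]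
    symm
    apply pv_foldl_max_eq
    · exact le_trans (le_max_left a _) (le_max_left _ _)
    · intro p hp
      by_cases hpa : a ≤ p.1
      · have hmin : min a (p.1 + 1) = a := min_eq_left (by omega)
        rw [hmin]
        have hb := hiB h1 p hp hpa
        have hr : a + (hi[pvFirstKeyGe hi a]).2 ≤ max a (a + (hi[pvFirstKeyGe hi a]).2) :=
          le_max_right _ _
        have ho : max a (a + (hi[pvFirstKeyGe hi a]).2)
            ≤ max (max a (a + (hi[pvFirstKeyGe hi a]).2)) ((lo[pvFirstKeyGe lo a - 1]).2) :=
          le_max_left _ _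
        omega
      · push_neg at hpa
        have hmin : min a (p.1 + 1) = p.1 + 1 := min_eq_right (by omega)
        rw [hmin]
        have hpE : (p.1, p.2 + p.1 + 1) ∈ pvSeenE seen := List.mem_map.mpr ⟨p, hp, rfl⟩
        have hb := loB h2 hl2 _ hpE hpa
        have hr : (lo[pvFirstKeyGe lo a - 1]).2
            ≤ max (max a (a + (hi[pvFirstKeyGe hi a]).2)) ((lo[pvFirstKeyGe lo a - 1]).2) :=
          le_max_right _ _
        omega
    · rcases max_cases (max a (a + (hi[pvFirstKeyGe hi a]).2)) ((lo[pvFirstKeyGe lo a - 1]).2)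
        with ⟨he, _⟩ | ⟨he, _⟩
      · rcases max_cases a (a + (hi[pvFirstKeyGe hi a]).2) with ⟨he2, _⟩ | ⟨he2, _⟩
        · left; rw [he, he2]
        · right
          refine ⟨hi[pvFirstKeyGe hi a], hmem _ (List.getElem_mem _), ?_⟩
          have hkey : a ≤ (hi[pvFirstKeyGe hi a]).1 := hige _ h1 le_rfl
          have hmin : min a ((hi[pvFirstKeyGe hi a]).1 + 1) = a := min_eq_left (by omega)
          rw [he, he2, hmin]
          omega
      · right
        obtain ⟨p, hp, hpe⟩ := List.mem_map.mp (lmem _ (List.getElem_mem hl2))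
        refine ⟨p, hp, ?_⟩
        have hkey : (lo[pvFirstKeyGe lo a - 1]).1 < a := lilt _ hl2 (by omega)
        have hp1 : p.1 = (lo[pvFirstKeyGe lo a - 1]).1 := by rw [← hpe]
        have hp2 : p.2 + p.1 + 1 = (lo[pvFirstKeyGe lo a - 1]).2 := by rw [← hpe]
        have hmin : min a (p.1 + 1) = p.1 + 1 := min_eq_right (by omega)
        rw [he, hmin]
        omega
  · rw [if_neg h2, if_pos h1, List.getD_eq_getElem hi (0, 0) h1]
    symm
    apply pv_foldl_max_eq
    · exact le_max_left a _
    · intro p hp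
      by_cases hpa : a ≤ p.1
      · have hmin : min a (p.1 + 1) = a := min_eq_left (by omega)
        rw [hmin]
        have hb := hiB h1 p hp hpa
        have hr : a + (hi[pvFirstKeyGe hi a]).2 ≤ max a (a + (hi[pvFirstKeyGe hi a]).2) :=
          le_max_right _ _
        omega
      · push_neg at hpa
        exfalso
        have hpE : (p.1, p.2 + p.1 + 1) ∈ pvSeenE seen := List.mem_map.mpr ⟨p, hp, rfl⟩
        have := loN (by omega) _ hpE
        simp at this
        omega
    · rcases max_cases a (a + (hi[pvFirstKeyGe hi a]).2) with ⟨he2, _⟩ | ⟨he2, _⟩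
      · left; rw [he2]
      · right
        refine ⟨hi[pvFirstKeyGe hi a], hmem _ (List.getElem_mem _), ?_⟩
        have hkey : a ≤ (hi[pvFirstKeyGe hi a]).1 := hige _ h1 le_rfl
        have hmin : min a ((hi[pvFirstKeyGe hi a]).1 + 1) = a := min_eq_left (by omega)
        rw [he2, hmin]
        omega
  · have hl2 : pvFirstKeyGe lo a - 1 < lo.length := by omega
    rw [if_pos h2, if_neg h1, List.getD_eq_getElem lo (0, 0) hl2]
    symm
    apply pv_foldl_max_eq
    · exact le_max_left a _
    · intro p hp
      by_cases hpa : a ≤ p.1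
      · exfalso
        have := hiN h1 p hp
        omega
      · push_neg at hpa
        have hmin : min a (p.1 + 1) = p.1 + 1 := min_eq_right (by omega)
        rw [hmin]
        have hpE : (p.1, p.2 + p.1 + 1) ∈ pvSeenE seen := List.mem_map.mpr ⟨p, hp, rfl⟩
        have hb := loB h2 hl2 _ hpE hpa
        have hr : (lo[pvFirstKeyGe lo a - 1]).2 ≤ max a ((lo[pvFirstKeyGe lo a - 1]).2) :=
          le_max_right _ _
        omega
    · rcases max_cases a ((lo[pvFirstKeyGe lo a - 1]).2) with ⟨he2, _⟩ | ⟨he2, _⟩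
      · left; rw [he2]
      · right
        obtain ⟨p, hp, hpe⟩ := List.mem_map.mp (lmem _ (List.getElem_mem hl2))
        refine ⟨p, hp, ?_⟩
        have hkey : (lo[pvFirstKeyGe lo a - 1]).1 < a := lilt _ hl2 (by omega)
        have hp1 : p.1 = (lo[pvFirstKeyGe lo a - 1]).1 := by rw [← hpe]
        have hp2 : p.2 + p.1 + 1 = (lo[pvFirstKeyGe lo a - 1]).2 := by rw [← hpe]
        have hmin : min a (p.1 + 1) = p.1 + 1 := min_eq_right (by omega)
        rw [he2, hmin]
        omega
  · rw [if_neg h2, if_neg h1]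
    symm
    apply pv_foldl_max_eq
    · exact le_refl a
    · intro p hp
      by_cases hpa : a ≤ p.1
      · exfalso
        have := hiN h1 p hp
        omega
      · exfalso
        push_neg at hpa
        have hpE : (p.1, p.2 + p.1 + 1) ∈ pvSeenE seen := List.mem_map.mpr ⟨p, hp, rfl⟩
        have := loN (by omega) _ hpE
        simp at this
        omega
    · exact Or.inl rfl

-- max? of a snoc
lemma pv_max?_snoc (l : List Int) (c : Int) :
    (l ++ [c]).max? = (match l.max? with
      | none => some c
      | some b => if b < c then some c else some b) := by
  cases l with
  | nil => simp
  | cons x xs =>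
      simp only [List.max?_cons', List.cons_append, List.foldl_append, List.foldl_cons,
        List.foldl_nil]
      rcases max_cases (xs.foldl max x) c with ⟨he, hc⟩ | ⟨he, hc⟩ <;> rw [he] <;> split <;>
        first | rfl | (congr 1; omega)

-- the fold state after processing xs
lemma pvB_state (xs : List Int) :
    pvHiFront (xs.foldl pvStepB ([], [], none)).1 (pvRef xs) ∧
    pvLoFront (xs.foldl pvStepB ([], [], none)).2.1 (pvSeenE (pvRef xs)) ∧
    (xs.foldl pvStepB ([], [], none)).2.2 = ((pvRef xs).map Prod.snd).max? := by
  induction xs using List.reverseRecOn with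
  | nil =>
      exact ⟨⟨List.Pairwise.nil, by simp, by simp [pvRef]⟩,
        ⟨List.Pairwise.nil, by simp, by simp [pvRef, pvSeenE]⟩, by simp [pvRef]⟩
  | append_singleton xs a ih =>
      obtain ⟨ihh, ihl, ihb⟩ := ih
      rw [List.foldl_append]
      have hrefapp : pvRef (xs ++ [a]) = pvRef xs ++ [(a, pvG a (pvRef xs))] := by
        simp [pvRef, List.foldl_append, pvStep]
      have hcand := pv_cand_eq (xs.foldl pvStepB ([], [], none)).1
        (xs.foldl pvStepB ([], [], none)).2.1 (pvRef xs) a ihh ihl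
      simp only [List.foldl_cons, List.foldl_nil, pvStepB]
      rw [hcand]
      refine ⟨?_, ?_, ?_⟩
      · rw [hrefapp]
        exact pvPushHi_inv _ _ a _ ihh
      · rw [hrefapp]
        have hse : pvSeenE (pvRef xs ++ [(a, pvG a (pvRef xs))])
            = pvSeenE (pvRef xs) ++ [(a, pvG a (pvRef xs) + a + 1)] := by
          simp [pvSeenE]
        rw [hse]
        exact pvPushLo_inv _ _ a _ ihl
      · rw [hrefapp, ihb]
        simp only [List.map_append, List.map]
        rw [pv_max?_snoc]

lemma pv_B_eq (arr : List Int) :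
    findMaxProducts1_alt arr = (((pvRef arr).map Prod.snd).max?).getD 0 := by
  unfold findMaxProducts1_alt
  rw [(pvB_state arr).2.2]

-- ===== VERDICT (by name: the statement is the Claim_ definition above) =====
theorem findMaxProducts1_spec : Claim_equal_findMaxProducts1 := by
  intro arr _ _
  unfold Spec_findMaxProducts1
  rw [pv_A_eq, pv_B_eq]
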